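-- pv_equiv track=rewrite | github.com/mergedao/deepcore | agents/utils/openapi_utils.py | parse_request_args
-- ===== SOURCE A (Python) =====
-- from typing import Dict, Any, Tuple, List
--
-- HEADER_SUFFIX = '_by_header'
--
-- PARAMS_SUFFIX = '_by_params'
--
-- PATH_SUFFIX = '_by_paths'
--
-- def parse_request_args(args: Dict) -> Tuple[Dict, Dict, Dict, Dict]:
--     """
--     Parse request arguments and separate them into header, query, path, and body parameters.
--     """
--     header_params, query_params, path_params, body_params = {}, {}, {}, {}
--     if isinstance(args, dict):
--         for key, value in args.items():
--             if key.endswith(HEADER_SUFFIX):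
--                 header_params[key[:-len(HEADER_SUFFIX)]] = value
--             elif key.endswith(PARAMS_SUFFIX):
--                 query_params[key[:-len(PARAMS_SUFFIX)]] = value
--             elif key.endswith(PATH_SUFFIX):
--                 path_params[key[:-len(PATH_SUFFIX)]] = value
--             else:
--                 body_params[key] = value
--     return header_params, query_params, path_params, body_params
-- ===== SOURCE B (Python) =====
-- from typing import Dict, Tuple
--
-- HEADER_SUFFIX = '_by_header'
-- PARAMS_SUFFIX = '_by_params'
-- PATH_SUFFIX = '_by_paths'
--
-- def parse_request_args(args: Dict) -> Tuple[Dict, Dict, Dict, Dict]: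
--     """Split args into header/query/path/body dicts with four independent passes."""
--     if not isinstance(args, dict):
--         return {}, {}, {}, {}
--     header_params = {k[:-len(HEADER_SUFFIX)]: v for k, v in args.items() if k.endswith(HEADER_SUFFIX)}
--     query_params = {k[:-len(PARAMS_SUFFIX)]: v for k, v in args.items() if k.endswith(PARAMS_SUFFIX)}
--     path_params = {k[:-len(PATH_SUFFIX)]: v for k, v in args.items() if k.endswith(PATH_SUFFIX)}
--     body_params = {k: v for k, v in args.items()
--                    if not k.endswith((HEADER_SUFFIX, PARAMS_SUFFIX, PATH_SUFFIX))}
--     return header_params, query_params, path_params, body_params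
-- ===== Notes on version B (the rewrite author's own statement) =====
-- stated objective: simpler
-- what changed: Replaces the single routing loop with four accumulators by four independent dict comprehensions over args.items(), one per suffix category plus a body comprehension that excludes all three suffixes (the suffixes are mutually exclusive, so the elif order is irrelevant).
import Mathlib
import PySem

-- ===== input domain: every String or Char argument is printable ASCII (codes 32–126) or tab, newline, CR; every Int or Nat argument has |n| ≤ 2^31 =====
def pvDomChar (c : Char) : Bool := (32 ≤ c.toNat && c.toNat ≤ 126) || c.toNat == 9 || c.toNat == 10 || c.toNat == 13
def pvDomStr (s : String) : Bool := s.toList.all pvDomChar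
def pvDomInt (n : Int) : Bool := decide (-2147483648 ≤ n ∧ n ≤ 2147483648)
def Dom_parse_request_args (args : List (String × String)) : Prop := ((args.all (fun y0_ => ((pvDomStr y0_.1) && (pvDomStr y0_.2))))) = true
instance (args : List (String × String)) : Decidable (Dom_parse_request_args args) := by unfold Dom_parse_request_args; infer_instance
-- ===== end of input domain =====

-- B replaces A's single routing loop by four independent filtered passes (dict comprehensions); simpler, same cost.

-- ===== PORT A =====
-- A: one pass over args.items(), routing each pair into one of four dicts by an elif chain on key suffixes.
def parse_request_args (args : List (String × String)) : (List (String × String)) × (List (String × String)) × (List (String × String)) × (List (String × String)) :=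
  let st := args.foldl (fun (st : PySem.Dict String String × PySem.Dict String String × PySem.Dict String String × PySem.Dict String String) kv =>
    let (h, q, p, b) := st
    let (key, value) := kv
    if PySem.Str.endswith key "_by_header" then
      (h.insert (PySem.Str.slice key none (some (-10))) value, q, p, b)
    else if PySem.Str.endswith key "_by_params" then
      (h, q.insert (PySem.Str.slice key none (some (-10))) value, p, b)
    else if PySem.Str.endswith key "_by_paths" then
      (h, q, p.insert (PySem.Str.slice key none (some (-9))) value, b)
    else
      (h, q, p, b.insert key value))
    (PySem.Dict.empty, PySem.Dict.empty, PySem.Dict.empty, PySem.Dict.empty)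
  (st.1.items, st.2.1.items, st.2.2.1.items, st.2.2.2.items)

-- ===== PORT B =====
-- B: four independent dict comprehensions over args.items().
def parse_request_args_alt (args : List (String × String)) : (List (String × String)) × (List (String × String)) × (List (String × String)) × (List (String × String)) :=
  let header := PySem.Dict.ofList ((args.filter (fun kv => PySem.Str.endswith kv.1 "_by_header")).map (fun kv => (PySem.Str.slice kv.1 none (some (-10)), kv.2)))
  let query := PySem.Dict.ofList ((args.filter (fun kv => PySem.Str.endswith kv.1 "_by_params")).map (fun kv => (PySem.Str.slice kv.1 none (some (-10)), kv.2)))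
  let path := PySem.Dict.ofList ((args.filter (fun kv => PySem.Str.endswith kv.1 "_by_paths")).map (fun kv => (PySem.Str.slice kv.1 none (some (-9)), kv.2)))
  let body := PySem.Dict.ofList (args.filter (fun kv => !(PySem.Str.endswith kv.1 "_by_header" || PySem.Str.endswith kv.1 "_by_params" || PySem.Str.endswith kv.1 "_by_paths")))
  (header.items, query.items, path.items, body.items)

-- ===== PRECONDITION & SPEC =====
def Spec_parse_request_args (args : List (String × String)) (out : (List (String × String)) × (List (String × String)) × (List (String × String)) × (List (String × String))) : Prop := out = parse_request_args_alt args
instance (args : List (String × String)) (out : (List (String × String)) × (List (String × String)) × (List (String × String)) × (List (String × String))) : Decidable (Spec_parse_request_args args out) := by unfold Spec_parse_request_args; infer_instance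

-- ===== CLAIM (what is proved, stated in full; the proofs are below) =====
def Claim_equal_parse_request_args : Prop := ∀ (args : List (String × String)), Dom_parse_request_args args → Spec_parse_request_args args (parse_request_args args)

-- ===== LEMMAS AND PROOFS =====

-- a shorter suffix of the same list is a suffix of a longer one
theorem pvSuffix_of_suffix_le {α : Type} (l a b : List α) (ha : a <:+ l) (hb : b <:+ l)
    (hlen : b.length ≤ a.length) : b <:+ a := by
  have h := List.prefix_of_prefix_length_le (List.reverse_prefix.mpr hb)
    (List.reverse_prefix.mpr ha) (by simpa using hlen)
  exact List.reverse_prefix.mp h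

theorem pvNotP_of_H (k : String) (h : PySem.Str.endswith k "_by_header" = true) :
    PySem.Str.endswith k "_by_params" = false := by
  by_contra hc
  have hp : PySem.Str.endswith k "_by_params" = true := by
    cases hq : PySem.Str.endswith k "_by_params" <;> simp_all
  have h1 := (PySem.Chars.endswith_iff _ _).mp (by simpa using h)
  have h2 := (PySem.Chars.endswith_iff _ _).mp (by simpa using hp)
  have := pvSuffix_of_suffix_le _ _ _ h1 h2 (by decide)
  revert this; decide

theorem pvNotT_of_H (k : String) (h : PySem.Str.endswith k "_by_header" = true) :
    PySem.Str.endswith k "_by_paths" = false := by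
  by_contra hc
  have hp : PySem.Str.endswith k "_by_paths" = true := by
    cases hq : PySem.Str.endswith k "_by_paths" <;> simp_all
  have h1 := (PySem.Chars.endswith_iff _ _).mp (by simpa using h)
  have h2 := (PySem.Chars.endswith_iff _ _).mp (by simpa using hp)
  have := pvSuffix_of_suffix_le _ _ _ h1 h2 (by decide)
  revert this; decide

theorem pvNotT_of_P (k : String) (h : PySem.Str.endswith k "_by_params" = true) :
    PySem.Str.endswith k "_by_paths" = false := by
  by_contra hc
  have hp : PySem.Str.endswith k "_by_paths" = true := by
    cases hq : PySem.Str.endswith k "_by_paths" <;> simp_all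
  have h1 := (PySem.Chars.endswith_iff _ _).mp (by simpa using h)
  have h2 := (PySem.Chars.endswith_iff _ _).mp (by simpa using hp)
  have := pvSuffix_of_suffix_le _ _ _ h1 h2 (by decide)
  revert this; decide

-- main invariant: A's routing fold from arbitrary accumulators equals B's four filtered insert-folds
theorem pvFold_eq (args : List (String × String)) :
    ∀ (h q p b : PySem.Dict String String),
    args.foldl (fun (st : PySem.Dict String String × PySem.Dict String String × PySem.Dict String String × PySem.Dict String String) kv =>
      let (h, q, p, b) := st
      let (key, value) := kv
      if PySem.Str.endswith key "_by_header" then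
        (h.insert (PySem.Str.slice key none (some (-10))) value, q, p, b)
      else if PySem.Str.endswith key "_by_params" then
        (h, q.insert (PySem.Str.slice key none (some (-10))) value, p, b)
      else if PySem.Str.endswith key "_by_paths" then
        (h, q, p.insert (PySem.Str.slice key none (some (-9))) value, b)
      else
        (h, q, p, b.insert key value)) (h, q, p, b) =
    (((args.filter (fun kv => PySem.Str.endswith kv.1 "_by_header")).map (fun kv => (PySem.Str.slice kv.1 none (some (-10)), kv.2))).foldl (fun d kv => d.insert kv.1 kv.2) h,
     ((args.filter (fun kv => PySem.Str.endswith kv.1 "_by_params")).map (fun kv => (PySem.Str.slice kv.1 none (some (-10)), kv.2))).foldl (fun d kv => d.insert kv.1 kv.2) q,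
     ((args.filter (fun kv => PySem.Str.endswith kv.1 "_by_paths")).map (fun kv => (PySem.Str.slice kv.1 none (some (-9)), kv.2))).foldl (fun d kv => d.insert kv.1 kv.2) p,
     (args.filter (fun kv => !(PySem.Str.endswith kv.1 "_by_header" || PySem.Str.endswith kv.1 "_by_params" || PySem.Str.endswith kv.1 "_by_paths"))).foldl (fun d kv => d.insert kv.1 kv.2) b) := by
  induction args with
  | nil => intro h q p b; rfl
  | cons kv rest ih =>
    intro h q p b
    obtain ⟨key, value⟩ := kv
    by_cases hH : PySem.Str.endswith key "_by_header" = true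
    · have hH' : PySem.Chars.endswith key.toList ['_','b','y','_','h','e','a','d','e','r'] = true := by simpa using hH
      have hP' : PySem.Chars.endswith key.toList ['_','b','y','_','p','a','r','a','m','s'] = false := by
        simpa using pvNotP_of_H key hH
      have hT' : PySem.Chars.endswith key.toList ['_','b','y','_','p','a','t','h','s'] = false := by
        simpa using pvNotT_of_H key hH
      simp [hH', hP', hT']
      simpa using ih (h.insert (PySem.Str.slice key none (some (-10))) value) q p b
    · by_cases hP : PySem.Str.endswith key "_by_params" = true
      · have hH' : PySem.Chars.endswith key.toList ['_','b','y','_','h','e','a','d','e','r'] = false := by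
          simpa using eq_false_of_ne_true hH
        have hP' : PySem.Chars.endswith key.toList ['_','b','y','_','p','a','r','a','m','s'] = true := by simpa using hP
        have hT' : PySem.Chars.endswith key.toList ['_','b','y','_','p','a','t','h','s'] = false := by
          simpa using pvNotT_of_P key hP
        simp [hH', hP', hT']
        simpa using ih h (q.insert (PySem.Str.slice key none (some (-10))) value) p b
      · by_cases hT : PySem.Str.endswith key "_by_paths" = true
        · have hH' : PySem.Chars.endswith key.toList ['_','b','y','_','h','e','a','d','e','r'] = false := by
            simpa using eq_false_of_ne_true hH
          have hP' : PySem.Chars.endswith key.toList ['_','b','y','_','p','a','r','a','m','s'] = false := by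
            simpa using eq_false_of_ne_true hP
          have hT' : PySem.Chars.endswith key.toList ['_','b','y','_','p','a','t','h','s'] = true := by simpa using hT
          simp [hH', hP', hT']
          simpa using ih h q (p.insert (PySem.Str.slice key none (some (-9))) value) b
        · have hH' : PySem.Chars.endswith key.toList ['_','b','y','_','h','e','a','d','e','r'] = false := by
            simpa using eq_false_of_ne_true hH
          have hP' : PySem.Chars.endswith key.toList ['_','b','y','_','p','a','r','a','m','s'] = false := by
            simpa using eq_false_of_ne_true hP
          have hT' : PySem.Chars.endswith key.toList ['_','b','y','_','p','a','t','h','s'] = false := by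
            simpa using eq_false_of_ne_true hT
          simp [hH', hP', hT']
          simpa using ih h q p (b.insert key value)

theorem pvDict_ofList_eq_foldl {κ ν : Type} [BEq κ] (l : List (κ × ν)) :
    PySem.Dict.ofList l = l.foldl (fun d kv => d.insert kv.1 kv.2) PySem.Dict.empty := rfl

-- ===== VERDICT (by name: the statement is the Claim_ definition above) =====
theorem parse_request_args_spec : Claim_equal_parse_request_args := by
  intro args _
  show parse_request_args args = parse_request_args_alt args
  unfold parse_request_args parse_request_args_alt
  simp only [pvFold_eq, pvDict_ofList_eq_foldl]
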